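-- pv_equiv track=rewrite | github.com/whalespotterhd/YAPC | YAPC.py | pidgey_calc
-- ===== SOURCE A (Python) =====
-- def pidgey_calc(pokemon_name, pokemon_amount,
-- 				pokemon_candy, candy_needed):
-- 					amount_of_evolutions = 0
-- 					pokemon_transfered = 0
-- 					a = pokemon_name
-- 					b = pokemon_amount
-- 					c = pokemon_candy
-- 					d = candy_needed
-- 					# as long as their are pokemon left
-- 					while b > 0:
-- 						# transfer 1 pokemon
-- 						if c < d:
-- 							b -= 1
-- 							c += 1
-- 							pokemon_transfered += 1
-- 						# else, evolve 1 pokemon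
-- 						else:
-- 							c -= d
-- 							amount_of_evolutions += 1
-- 							b -= 1
-- 							#gain 1 candy from evolving
-- 							c += 1
-- 					return (amount_of_evolutions, pokemon_transfered)
-- ===== SOURCE B (Python) =====
-- def pidgey_calc(pokemon_name, pokemon_amount,
--                 pokemon_candy, candy_needed):
--     # Closed-form: every step consumes one pokemon; count evolutions by floor arithmetic.
--     b, c, d = pokemon_amount, pokemon_candy, candy_needed
--     n = b if b > 0 else 0
--     if d <= 1:
--         # once candy reaches d it never drops below it: only the first
--         # max(0, d - c) steps (capped at n) are transfers
--         e = n - min(n, max(0, d - c))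
--     elif c < d:
--         # d - c transfers, then one evolution every d steps (evolve + d-1 transfers)
--         e = max(0, (n + c - 1) // d)
--     else:
--         # s leading evolutions burn the candy surplus, then the periodic regime
--         s = (c - d) // (d - 1) + 1
--         e = min(n, s + max(0, (n - s + (c - s * (d - 1)) - 1) // d))
--     return (e, n - e)
-- ===== Notes on version B (the rewrite author's own statement) =====
-- stated objective: faster
-- what changed: Replaced the per-pokemon simulation loop with a three-case closed-form floor-arithmetic formula for the evolution count (transfers = total - evolutions).
import Mathlib
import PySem

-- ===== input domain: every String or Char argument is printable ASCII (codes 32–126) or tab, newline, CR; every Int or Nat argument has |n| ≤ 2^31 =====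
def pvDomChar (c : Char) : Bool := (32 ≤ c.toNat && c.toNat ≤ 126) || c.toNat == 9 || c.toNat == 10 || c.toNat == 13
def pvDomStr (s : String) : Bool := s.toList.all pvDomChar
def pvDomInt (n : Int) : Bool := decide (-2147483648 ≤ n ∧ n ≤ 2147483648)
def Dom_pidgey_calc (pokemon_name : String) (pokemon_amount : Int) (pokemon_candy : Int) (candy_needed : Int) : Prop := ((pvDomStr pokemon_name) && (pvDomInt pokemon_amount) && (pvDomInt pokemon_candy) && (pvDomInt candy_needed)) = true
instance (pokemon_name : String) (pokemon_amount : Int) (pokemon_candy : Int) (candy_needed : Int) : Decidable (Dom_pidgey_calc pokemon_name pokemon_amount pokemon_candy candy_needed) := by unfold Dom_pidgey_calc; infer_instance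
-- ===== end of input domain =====

-- B replaces A's per-pokemon simulation loop by a closed-form floor-arithmetic
-- count of evolutions (objective: faster — O(1) arithmetic instead of one loop
-- iteration per pokemon).

-- ===== PORT A =====
-- the while-loop of A: state (b, c, e, t); one iteration per pokemon
def pvLoopA (b c d e t : Int) : Int × Int :=
  if h : 0 < b then
    if c < d then
      pvLoopA (b - 1) (c + 1) d e (t + 1)
    else
      pvLoopA (b - 1) (c - d + 1) d (e + 1) t
  else
    (e, t)
termination_by b.toNat
decreasing_by all_goals omega

def pidgey_calc (pokemon_name : String) (pokemon_amount : Int) (pokemon_candy : Int) (candy_needed : Int) : List Int :=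
  let r := pvLoopA pokemon_amount pokemon_candy candy_needed 0 0
  [r.1, r.2]

-- ===== PORT B =====
def pidgey_calc_alt (pokemon_name : String) (pokemon_amount : Int) (pokemon_candy : Int) (candy_needed : Int) : List Int :=
  let b := pokemon_amount
  let c := pokemon_candy
  let d := candy_needed
  let n := if 0 < b then b else 0
  let e :=
    if d ≤ 1 then
      n - min n (max 0 (d - c))
    else if c < d then
      max 0 (PySem.Int.floordiv (n + c - 1) d)
    else
      let s := PySem.Int.floordiv (c - d) (d - 1) + 1
      min n (s + max 0 (PySem.Int.floordiv (n - s + (c - s * (d - 1)) - 1) d))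
  [e, n - e]

-- ===== PRECONDITION & SPEC =====
def Spec_pidgey_calc (pokemon_name : String) (pokemon_amount : Int) (pokemon_candy : Int) (candy_needed : Int) (out : List Int) : Prop := out = pidgey_calc_alt pokemon_name pokemon_amount pokemon_candy candy_needed
instance (pokemon_name : String) (pokemon_amount : Int) (pokemon_candy : Int) (candy_needed : Int) (out : List Int) : Decidable (Spec_pidgey_calc pokemon_name pokemon_amount pokemon_candy candy_needed out) := by unfold Spec_pidgey_calc; infer_instance

-- ===== CLAIM (what is proved, stated in full; the proofs are below) =====
def Claim_equal_pidgey_calc : Prop := ∀ (pokemon_name : String) (pokemon_amount : Int) (pokemon_candy : Int) (candy_needed : Int), Dom_pidgey_calc pokemon_name pokemon_amount pokemon_candy candy_needed → Spec_pidgey_calc pokemon_name pokemon_amount pokemon_candy candy_needed (pidgey_calc pokemon_name pokemon_amount pokemon_candy candy_needed)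

-- ===== LEMMAS AND PROOFS =====

-- the evolution count computed by B, as a standalone function (proof helper)
def pvE (b c d : Int) : Int :=
  let n := if 0 < b then b else 0
  if d ≤ 1 then
    n - min n (max 0 (d - c))
  else if c < d then
    max 0 ((n + c - 1) / d)
  else
    let s := (c - d) / (d - 1) + 1
    min n (s + max 0 ((n - s + (c - s * (d - 1)) - 1) / d))

lemma pvDivLe (a d q : Int) (hd : 0 < d) : a / d ≤ q ↔ a < (q + 1) * d := by
  have h := Int.le_ediv_iff_mul_le (a := q + 1) (b := a) hd
  constructor
  · intro hle
    by_contra hlt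
    have h2 := h.mpr (by omega)
    omega
  · intro hlt
    by_contra hle
    have h2 := h.mp (by omega)
    exact absurd h2 (by omega)

lemma pvE_zero (b c d : Int) (hb : b ≤ 0) : pvE b c d = 0 := by
  unfold pvE
  simp only [show ¬ 0 < b by omega, if_false]
  split_ifs with h1 h2
  · omega
  · have : (0 + c - 1) / d ≤ 0 := by
      rw [pvDivLe _ _ _ (by omega)]; omega
    omega
  · have hs : 0 ≤ (c - d) / (d - 1) := Int.ediv_nonneg (by omega) (by omega)
    omega

lemma pvE_transfer (b c d : Int) (hb : 0 < b) (hc : c < d) :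
    pvE b c d = pvE (b - 1) (c + 1) d := by
  unfold pvE
  simp only [show (0 < b) = True by simp [hb], if_true]
  by_cases hd : d ≤ 1
  · simp only [hd, if_true]
    split_ifs <;> omega
  · simp only [hd, if_false]
    by_cases hcd : c + 1 < d
    · -- both in the middle branch; the numerators coincide
      simp only [show c < d from hc, if_true, hcd, if_true]
      congr 2
      split_ifs <;> omega
    · -- c = d - 1: right side enters the third branch with s' = 1
      have hce : c = d - 1 := by omega
      simp only [show c < d from hc, if_true, hcd, if_false]
      have hs : (c + 1 - d) / (d - 1) = 0 := by
        rw [show c + 1 - d = 0 by omega]; simp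
      rw [hs]
      by_cases hb2 : 0 < b - 1
      · simp only [hb2, if_true]
        have hnum : b - 1 - (0 + 1) + (c + 1 - (0 + 1) * (d - 1)) - 1 = b - 2 := by
          rw [hce]; ring
        rw [hnum]
        have hnum2 : b + c - 1 = (b - 2) + 1 * d := by rw [hce]; ring
        rw [hnum2, Int.add_mul_ediv_right _ _ (by omega : d ≠ 0)]
        have h0 : 0 ≤ (b - 2) / d := Int.ediv_nonneg (by omega) (by omega)
        have hle : (b - 2) / d ≤ b - 2 := Int.ediv_le_self _ (by omega)
        omega
      · simp only [hb2, if_false]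
        have hbe : b = 1 := by omega
        subst hbe
        have h1 : (1 + c - 1) / d = 0 := by
          rw [hce, show 1 + (d - 1) - 1 = d - 1 by ring]
          exact Int.ediv_eq_zero_of_lt (by omega) (by omega)
        rw [h1]
        have h2 : (0 - (0 + 1) + (c + 1 - (0 + 1) * (d - 1)) - 1) / d = -1 / d := by
          congr 1; rw [hce]; ring
        rw [h2]
        have h3 : (-1 : Int) / d ≤ 0 := by rw [pvDivLe _ _ _ (by omega)]; omega
        omega

lemma pvE_evolve (b c d : Int) (hb : 0 < b) (hc : d ≤ c) :
    pvE b c d = pvE (b - 1) (c - d + 1) d + 1 := by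
  unfold pvE
  simp only [show (0 < b) = True by simp [hb], if_true]
  by_cases hd : d ≤ 1
  · simp only [hd, if_true]
    split_ifs <;> omega
  · simp only [hd, if_false]
    have hncd : ¬ c < d := by omega
    simp only [hncd, if_false]
    by_cases hcd : c - d + 1 < d
    · -- c < 2d - 1 : left third branch with s = 1, right middle branch
      simp only [hcd, if_true]
      have hs : (c - d) / (d - 1) = 0 := Int.ediv_eq_zero_of_lt (by omega) (by omega)
      rw [hs]
      by_cases hb2 : 0 < b - 1
      · simp only [hb2, if_true]
        have hnum : b - (0 + 1) + (c - (0 + 1) * (d - 1)) - 1 = b - 1 + (c - d + 1) - 1 := by ring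
        rw [hnum]
        have hM : 0 ≤ (b - 1 + (c - d + 1) - 1) / d ∨ (b - 1 + (c - d + 1) - 1) / d < 0 := by omega
        have hub : (b - 1 + (c - d + 1) - 1) / d ≤ b - 2 := by
          rw [pvDivLe _ _ _ (by omega)]; nlinarith
        omega
      · simp only [hb2, if_false]
        have hbe : b = 1 := by omega
        subst hbe
        have h1 : (1 - (0 + 1) + (c - (0 + 1) * (d - 1)) - 1) / d = 0 := by
          rw [show 1 - (0 + 1) + (c - (0 + 1) * (d - 1)) - 1 = c - d by ring]
          exact Int.ediv_eq_zero_of_lt (by omega) (by omega)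
        have h2 : (0 + (c - d + 1) - 1) / d = 0 := by
          rw [show 0 + (c - d + 1) - 1 = c - d by ring]
          exact Int.ediv_eq_zero_of_lt (by omega) (by omega)
        rw [h1, h2]
        omega
    · -- c ≥ 2d - 1 : both in the third branch, s drops by one
      simp only [hcd, if_false]
      have hsub : (c - d + 1 - d) / (d - 1) = (c - d) / (d - 1) - 1 := by
        rw [show c - d + 1 - d = (c - d) + (-1) * (d - 1) by ring,
          Int.add_mul_ediv_right _ _ (by omega : d - 1 ≠ 0)]
        ring
      rw [hsub]
      set q := (c - d) / (d - 1) with hq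
      have hq1 : 1 ≤ q := by
        rw [hq, Int.le_ediv_iff_mul_le (by omega)]; omega
      by_cases hb2 : 0 < b - 1
      · simp only [hb2, if_true]
        have hnum : b - 1 - (q - 1 + 1) + (c - d + 1 - (q - 1 + 1) * (d - 1)) - 1
            = b - (q + 1) + (c - (q + 1) * (d - 1)) - 1 := by ring
        rw [hnum]
        omega
      · simp only [hb2, if_false]
        have hbe : b = 1 := by omega
        subst hbe
        have hnum : 0 - (q - 1 + 1) + (c - d + 1 - (q - 1 + 1) * (d - 1)) - 1
            = 1 - (q + 1) + (c - (q + 1) * (d - 1)) - 1 := by ring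
        rw [hnum]
        set M := (1 - (q + 1) + (c - (q + 1) * (d - 1)) - 1) / d with hM
        have hM0 : 0 ≤ max 0 M := le_max_left _ _
        omega

lemma pvLoopA_eq (d : Int) : ∀ (n : Nat) (b c e t : Int), b.toNat = n →
    pvLoopA b c d e t = (e + pvE b c d, t + ((if 0 < b then b else 0) - pvE b c d)) := by
  intro n
  induction n with
  | zero =>
    intro b c e t hn
    rw [pvLoopA]
    have hb : b ≤ 0 := by omega
    rw [pvE_zero b c d hb]
    simp [show ¬ 0 < b by omega]
  | succ m ih =>
    intro b c e t hn
    have hb : 0 < b := by omega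
    rw [pvLoopA]
    simp only [hb, dif_pos]
    by_cases hc : c < d
    · rw [if_pos hc, ih (b - 1) (c + 1) e (t + 1) (by omega),
        ← pvE_transfer b c d hb hc]
      rw [Prod.mk.injEq]
      exact ⟨rfl, by split_ifs <;> omega⟩
    · rw [if_neg hc, ih (b - 1) (c - d + 1) (e + 1) t (by omega),
        pvE_evolve b c d hb (by omega)]
      rw [Prod.mk.injEq]
      exact ⟨by ring, by split_ifs <;> omega⟩

lemma alt_eq_pvE (name : String) (b c d : Int) :
    pidgey_calc_alt name b c d = [pvE b c d, (if 0 < b then b else 0) - pvE b c d] := by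
  unfold pidgey_calc_alt pvE
  by_cases h1 : d ≤ 1
  · simp [h1]
  · simp only [PySem.Int.floordiv_eq_ediv_of_pos (by omega : (0:Int) < d),
      PySem.Int.floordiv_eq_ediv_of_pos (by omega : (0:Int) < d - 1)]

theorem pidgey_calc_spec : Claim_equal_pidgey_calc := by
  intro name b c d _
  unfold Spec_pidgey_calc pidgey_calc
  rw [pvLoopA_eq d b.toNat b c 0 0 rfl, alt_eq_pvE name b c d]
  simp
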